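-- pv_equiv track=rewrite | github.com/MK2091379/IUST_BSc | Data Structures and Algorithms/HW1_1_Prof/duplicate.py | DupStr
-- ===== SOURCE A (Python) =====
-- def DupStr(Str):
--     if len(Str)%2 != 0:
--         return False
--     if len(Str) == 0:
--         return True
--     if Str[:len(Str)//2] != Str[len(Str)//2:]:
--         return False
--     return DupStr(Str[1:len(Str)//2])
-- ===== SOURCE B (Python) =====
-- def DupStr(Str):
--     # Iterative, index-based: tracks the current segment Str[j:j+m] by offset
--     # and length instead of building substring copies at each step.
--     j, m = 0, len(Str)
--     while m:
--         if m % 2: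
--             return False
--         h = m // 2
--         if any(Str[j + i] != Str[j + h + i] for i in range(h)):
--             return False
--         j += 1
--         m = h - 1
--     return True
-- ===== Notes on version B (the rewrite author's own statement) =====
-- stated objective: alternative
-- what changed: Replaces the tail recursion that builds fresh substring copies at every level with a single iterative loop tracking the current segment by (offset, length) indices and comparing characters in place, so no intermediate strings are constructed.
import Mathlib
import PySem

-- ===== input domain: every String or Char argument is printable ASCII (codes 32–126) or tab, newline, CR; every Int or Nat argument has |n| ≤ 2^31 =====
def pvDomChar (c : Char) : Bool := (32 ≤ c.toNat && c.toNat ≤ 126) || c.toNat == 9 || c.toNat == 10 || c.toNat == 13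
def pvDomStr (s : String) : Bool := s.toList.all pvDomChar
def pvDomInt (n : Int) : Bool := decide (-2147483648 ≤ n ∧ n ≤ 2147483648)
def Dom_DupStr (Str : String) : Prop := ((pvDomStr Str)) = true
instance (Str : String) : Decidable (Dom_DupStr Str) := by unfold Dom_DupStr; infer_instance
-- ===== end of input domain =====

-- B replaces A's substring-copying tail recursion with one in-place index loop; return value only, no side effects.

-- ===== PORT A =====
-- A's recursion, on the list of characters; slices are PySem slices.
def goA (l : List Char) : Bool :=
  if l.length % 2 ≠ 0 then false
  else if l.length = 0 then true
  else
    let h := l.length / 2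
    if PySem.List.slice l none (some (h : Int)) ≠ PySem.List.slice l (some (h : Int)) none then false
    else goA (PySem.List.slice l (some (1 : Int)) (some (h : Int)))
termination_by l.length
decreasing_by
  rename_i h1 h2 _
  rw [show ((1:Int)) = ((1:Nat):Int) by norm_num, show ((l.length/2 : Nat):Int) = ((l.length/2 : Nat):Int) from rfl, PySem.List.slice_natCast]
  simp only [List.length_take, List.length_drop]
  omega

def DupStr (Str : String) : Bool := goA Str.toList

-- ===== PORT B =====
-- B's while-loop: state (j, m) = current segment Str[j:j+m]; chars compared in place.
def goB (l : List Char) (j m : Nat) : Bool :=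
  if m = 0 then true
  else if m % 2 = 1 then false
  else
    let h := m / 2
    if (List.range h).any (fun i => l.getD (j + i) ' ' != l.getD (j + h + i) ' ') then false
    else goB l (j + 1) (h - 1)
termination_by m
decreasing_by omega

def DupStr_alt (Str : String) : Bool := goB Str.toList 0 Str.toList.length

-- ===== PRECONDITION & SPEC =====
def Spec_DupStr (Str : String) (out : Bool) : Prop := out = DupStr_alt Str
instance (Str : String) (out : Bool) : Decidable (Spec_DupStr Str out) := by unfold Spec_DupStr; infer_instance

-- ===== CLAIM (what is proved, stated in full; the proofs are below) =====
def Claim_equal_DupStr : Prop := ∀ (Str : String), Dom_DupStr Str → Spec_DupStr Str (DupStr Str)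

-- ===== LEMMAS AND PROOFS =====

-- The halves-equality test of A on the segment equals B's index-wise scan.
lemma halves_eq_iff (l : List Char) (j h : Nat) (hle : j + 2 * h ≤ l.length) :
    (((l.drop j).take (2 * h)).take h = ((l.drop j).take (2 * h)).drop h) ↔
    (∀ i < h, l.getD (j + i) ' ' = l.getD (j + h + i) ' ') := by
  have hlen : ((l.drop j).take (2 * h)).length = 2 * h := by simp; omega
  constructor
  · intro heq i hi
    have h1 : j + i < l.length := by omega
    have h2 : j + h + i < l.length := by omega
    rw [List.getD_eq_getElem l ' ' h1, List.getD_eq_getElem l ' ' h2]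
    have e1 : (((l.drop j).take (2 * h)).take h)[i]'(by simp; omega) = l[j + i]'h1 := by
      simp [List.getElem_take, List.getElem_drop]
    have e2 : (((l.drop j).take (2 * h)).drop h)[i]'(by simp; omega) = l[j + h + i]'h2 := by
      simp [List.getElem_take, List.getElem_drop]
      congr 1
      omega
    rw [← e1, ← e2]
    congr 1
  · intro hall
    apply List.ext_getElem
    · simp [hlen]; omega
    · intro i hi1 hi2
      have hih : i < h := by simp [hlen] at hi1; omega
      have h1 : j + i < l.length := by omega
      have h2 : j + h + i < l.length := by omega
      have := hall i hih
      rw [List.getD_eq_getElem l ' ' h1, List.getD_eq_getElem l ' ' h2] at this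
      simpa [List.getElem_take, List.getElem_drop, Nat.add_assoc] using this

-- Main invariant: B's loop state (j, m) computes A on the segment l[j : j+m].
lemma goB_eq_goA (m : ℕ) : ∀ (l : List Char) (j : ℕ), j + m ≤ l.length →
    goB l j m = goA ((l.drop j).take m) := by
  induction m using Nat.strong_induction_on with
  | _ m IH =>
    intro l j hle
    have hlen : ((l.drop j).take m).length = m := by simp; omega
    by_cases hm0 : m = 0
    · subst hm0
      rw [goB, goA]
      simp
    by_cases hodd : m % 2 = 1
    · rw [goB, goA]
      simp [hm0, hodd, hlen]
    -- even, m ≥ 2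
    have hev : m % 2 = 0 := by omega
    have h2m : 2 * (m / 2) = m := by omega
    rw [goB, goA]
    simp only [hm0, if_false, hlen, hev, ite_not]
    have hcmp : (PySem.List.slice ((l.drop j).take m) none (some ((m / 2 : Nat) : Int)) =
        PySem.List.slice ((l.drop j).take m) (some ((m / 2 : Nat) : Int)) none) ↔
        (∀ i < m / 2, l.getD (j + i) ' ' = l.getD (j + m / 2 + i) ' ') := by
      rw [PySem.List.slice_to_natCast, PySem.List.slice_from_natCast]
      rw [show (l.drop j).take m = (l.drop j).take (2 * (m / 2)) by rw [h2m]]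
      exact halves_eq_iff l j (m / 2) (by omega)
    rw [if_neg (by norm_num), if_pos trivial]
    by_cases hagree : ∀ i < m / 2, l.getD (j + i) ' ' = l.getD (j + m / 2 + i) ' '
    · have hany : ((List.range (m / 2)).any fun i => l.getD (j + i) ' ' != l.getD (j + m / 2 + i) ' ') = false := by
        rw [List.any_eq_false]
        intro i hi
        simpa using hagree i (List.mem_range.mp hi)
      rw [hany, if_neg (by simp), if_pos (hcmp.mpr hagree)]
      have hseg : PySem.List.slice ((l.drop j).take m) (some 1) (some ((m / 2 : Nat) : Int)) =
          (l.drop (j + 1)).take (m / 2 - 1) := by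
        rw [show (1 : Int) = ((1 : Nat) : Int) by norm_num, PySem.List.slice_natCast]
        rw [List.drop_take, List.take_take, List.drop_drop]
        congr 1
        omega
      rw [hseg, IH (m / 2 - 1) (by omega) l (j + 1) (by omega)]
    · have hany : ((List.range (m / 2)).any fun i => l.getD (j + i) ' ' != l.getD (j + m / 2 + i) ' ') = true := by
        rw [List.any_eq_true]
        push Not at hagree
        obtain ⟨i, hi, hne⟩ := hagree
        exact ⟨i, List.mem_range.mpr hi, by simpa using hne⟩
      rw [hany, if_pos rfl, if_neg (fun hc => hagree (hcmp.mp hc))]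

-- ===== VERDICT (by name: the statement is the Claim_ definition above) =====
theorem DupStr_spec : Claim_equal_DupStr := by
  intro Str _
  unfold Spec_DupStr DupStr DupStr_alt
  rw [goB_eq_goA _ _ 0 (by omega)]
  rw [List.drop_zero, List.take_of_length_le (le_refl _)]
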